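-- pv_equiv track=rewrite | github.com/joshiprashanthd/proper_kg_project | src/utils/graph_utils.py | graph_reasoning_paths_to_text
-- ===== SOURCE A (Python) =====
-- def graph_reasoning_paths_to_text(reasoning_paths: list[list[str]]):
--     rps_text = []
--     for rp in reasoning_paths:
--         res = []
--         i = 0
--         while i < len(rp):
--             res.append('(' + rp[i] + ')')
--             if i < len(rp) - 1:
--                 res.append("--")
--                 res.append(rp[i+1])
--                 res.append("->")
--             i+=2
--         rps_text.append(" ".join(res))
--     rps_text = "\n".join([f"Path {i+1}: {path}" for i, path in enumerate(rps_text)])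
--     return rps_text
-- ===== SOURCE B (Python) =====
-- def graph_reasoning_paths_to_text(reasoning_paths: list[list[str]]):
--     def fmt(rp):
--         if len(rp) == 0:
--             return ""
--         if len(rp) == 1:
--             return "(" + rp[0] + ")"
--         if len(rp) == 2:
--             return "(" + rp[0] + ") -- " + rp[1] + " ->"
--         return "(" + rp[0] + ") -- " + rp[1] + " -> " + fmt(rp[2:])
--     return "\n".join(
--         "Path " + str(i) + ": " + fmt(rp)
--         for i, rp in enumerate(reasoning_paths, 1)
--     )
-- ===== Notes on version B (the rewrite author's own statement) =====
-- stated objective: simpler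
-- what changed: Replaces A's index-stepping while loop that accumulates a token list and space-joins it per path with a direct structural recursion that consumes the path two elements at a time and builds each path's string by plain concatenation (no intermediate token list, no join, no index arithmetic).
import Mathlib
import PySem

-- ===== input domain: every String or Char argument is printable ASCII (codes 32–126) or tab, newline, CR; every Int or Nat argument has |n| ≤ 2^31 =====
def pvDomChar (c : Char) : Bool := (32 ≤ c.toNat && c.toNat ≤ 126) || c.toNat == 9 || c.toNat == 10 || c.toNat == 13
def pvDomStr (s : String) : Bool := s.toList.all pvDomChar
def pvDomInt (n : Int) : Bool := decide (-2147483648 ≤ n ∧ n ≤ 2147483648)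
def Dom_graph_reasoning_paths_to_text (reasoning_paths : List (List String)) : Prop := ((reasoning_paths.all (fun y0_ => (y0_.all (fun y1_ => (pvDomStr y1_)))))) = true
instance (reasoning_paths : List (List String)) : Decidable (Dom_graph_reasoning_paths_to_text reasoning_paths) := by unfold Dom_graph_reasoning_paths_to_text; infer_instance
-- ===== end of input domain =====

-- B replaces A's index-stepping while loop (token list + " ".join per path) by a direct
-- two-at-a-time structural recursion building each path's string by concatenation; objective: simpler.

-- ===== PORT A =====
-- the while loop: i steps by 2; rp[i] / rp[i+1] are always in range when read, so List.getD is exact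
def pvLoopA (rp : List String) (i : Nat) (res : List String) : List String :=
  if h : i < rp.length then
    let res1 := res ++ ["(" ++ rp.getD i "" ++ ")"]
    let res2 := if i < rp.length - 1 then res1 ++ ["--", rp.getD (i+1) "", "->"] else res1
    pvLoopA rp (i+2) res2
  else res
termination_by rp.length - i
decreasing_by omega

def graph_reasoning_paths_to_text (reasoning_paths : List (List String)) : String :=
  let rps_text := reasoning_paths.map (fun rp => PySem.Str.join " " (pvLoopA rp 0 []))
  PySem.Str.join "\n" ((PySem.List.enumerate rps_text 0).map
    (fun p => "Path " ++ PySem.Int.toStr (p.1 + 1) ++ ": " ++ p.2))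

-- ===== PORT B =====
def pvFmt : List String → String
  | [] => ""
  | [n] => "(" ++ n ++ ")"
  | [n, e] => "(" ++ n ++ ") -- " ++ e ++ " ->"
  | n :: e :: rest => "(" ++ n ++ ") -- " ++ e ++ " -> " ++ pvFmt rest

def graph_reasoning_paths_to_text_alt (reasoning_paths : List (List String)) : String :=
  PySem.Str.join "\n" ((PySem.List.enumerate reasoning_paths 1).map
    (fun p => "Path " ++ PySem.Int.toStr p.1 ++ ": " ++ pvFmt p.2))

-- ===== PRECONDITION & SPEC =====
def Spec_graph_reasoning_paths_to_text (reasoning_paths : List (List String)) (out : String) : Prop := out = graph_reasoning_paths_to_text_alt reasoning_paths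
instance (reasoning_paths : List (List String)) (out : String) : Decidable (Spec_graph_reasoning_paths_to_text reasoning_paths out) := by unfold Spec_graph_reasoning_paths_to_text; infer_instance

-- ===== CLAIM (what is proved, stated in full; the proofs are below) =====
def Claim_equal_graph_reasoning_paths_to_text : Prop := ∀ (reasoning_paths : List (List String)), Dom_graph_reasoning_paths_to_text reasoning_paths → Spec_graph_reasoning_paths_to_text reasoning_paths (graph_reasoning_paths_to_text reasoning_paths)

-- ===== LEMMAS AND PROOFS =====
-- the token list A's loop produces from the suffix of the path starting at the current index
def pvTokA : List String → List String
  | [] => []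
  | [n] => ["(" ++ n ++ ")"]
  | n :: e :: rest => ["(" ++ n ++ ")", "--", e, "->"] ++ pvTokA rest

theorem pvLoopA_tok (rp : List String) :
    ∀ (n i : Nat) (res : List String), rp.length - i ≤ n →
      pvLoopA rp i res = res ++ pvTokA (rp.drop i) := by
  intro n
  induction n with
  | zero =>
    intro i res hn
    rw [pvLoopA]
    rw [dif_neg (by omega)]
    rw [List.drop_eq_nil_of_le (by omega)]
    simp [pvTokA]
  | succ n ih =>
    intro i res hn
    rw [pvLoopA]
    by_cases h : i < rp.length
    · rw [dif_pos h]
      rw [ih (i + 2) _ (by omega)]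
      rw [List.drop_eq_getElem_cons h]
      by_cases h2 : i < rp.length - 1
      · rw [if_pos h2]
        rw [List.drop_eq_getElem_cons (show i + 1 < rp.length by omega)]
        simp only [pvTokA, List.getD_eq_getElem _ _ h,
          List.getD_eq_getElem _ _ (show i + 1 < rp.length by omega)]
        simp [List.append_assoc]
      · rw [if_neg h2]
        have hnil : rp.drop (i + 1) = [] := List.drop_eq_nil_of_le (by omega)
        have hnil2 : rp.drop (i + 2) = [] := List.drop_eq_nil_of_le (by omega)
        rw [hnil, hnil2]
        simp [pvTokA, List.getElem?_eq_getElem h]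
    · rw [dif_neg h]
      rw [List.drop_eq_nil_of_le (by omega)]
      simp [pvTokA]

theorem pvTokA_cons (x : String) (xs : List String) :
    ∃ t, pvTokA (x :: xs) = ("(" ++ x ++ ")") :: t := by
  cases xs with
  | nil => exact ⟨[], rfl⟩
  | cons y ys => exact ⟨["--", y, "->"] ++ pvTokA ys, rfl⟩

theorem pvJoin_tok : ∀ (l : List String), PySem.Str.join " " (pvTokA l) = pvFmt l
  | [] => by
    apply String.toList_injective
    simp [pvTokA, pvFmt, PySem.Str.toList_join, PySem.Chars.join, List.intercalate]
  | [n] => by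
    apply String.toList_injective
    simp [pvTokA, pvFmt, PySem.Str.toList_join, PySem.Chars.join, List.intercalate]
  | [n, e] => by
    apply String.toList_injective
    simp [pvTokA, pvFmt, PySem.Str.toList_join, PySem.Chars.join, List.intercalate]
  | n :: e :: r :: rest => by
    obtain ⟨t, ht⟩ := pvTokA_cons r rest
    apply String.toList_injective
    have hih := congrArg String.toList (pvJoin_tok (r :: rest))
    rw [PySem.Str.toList_join, ht] at hih
    show (PySem.Str.join " " (pvTokA (n :: e :: r :: rest))).toList
        = (pvFmt (n :: e :: r :: rest)).toList
    rw [show pvTokA (n :: e :: r :: rest)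
        = ["(" ++ n ++ ")", "--", e, "->"] ++ pvTokA (r :: rest) from rfl, ht]
    rw [PySem.Str.toList_join]
    simp only [List.map_cons, List.cons_append, List.nil_append]
    rw [PySem.Chars.join_cons_cons, PySem.Chars.join_cons_cons,
      PySem.Chars.join_cons_cons, PySem.Chars.join_cons_cons]
    rw [List.map_cons] at hih
    rw [hih]
    simp [pvFmt, List.append_assoc]

theorem pvLines_eq : ∀ (l : List (List String)) (s : Int),
    (PySem.List.enumerate (l.map (fun rp => PySem.Str.join " " (pvLoopA rp 0 []))) s).map
      (fun p => "Path " ++ PySem.Int.toStr (p.1 + 1) ++ ": " ++ p.2)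
    = (PySem.List.enumerate l (s + 1)).map
      (fun p => "Path " ++ PySem.Int.toStr p.1 ++ ": " ++ pvFmt p.2) := by
  intro l
  induction l with
  | nil => intro s; simp [PySem.List.enumerate]
  | cons rp l ih =>
    intro s
    rw [List.map_cons, PySem.List.enumerate_cons, PySem.List.enumerate_cons]
    rw [List.map_cons, List.map_cons]
    rw [ih (s + 1)]
    have hpath : PySem.Str.join " " (pvLoopA rp 0 []) = pvFmt rp := by
      rw [pvLoopA_tok rp rp.length 0 [] (by omega)]
      simp [pvJoin_tok]
    rw [hpath]

-- ===== VERDICT (by name: the statement is the Claim_ definition above) =====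
theorem graph_reasoning_paths_to_text_spec : Claim_equal_graph_reasoning_paths_to_text := by
  intro rps _
  unfold Spec_graph_reasoning_paths_to_text
  unfold graph_reasoning_paths_to_text graph_reasoning_paths_to_text_alt
  have := pvLines_eq rps 0
  norm_num at this
  show PySem.Str.join "\n"
      ((PySem.List.enumerate (rps.map (fun rp => PySem.Str.join " " (pvLoopA rp 0 []))) 0).map
        (fun p => "Path " ++ PySem.Int.toStr (p.1 + 1) ++ ": " ++ p.2)) = _
  rw [this]
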